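-- pv_equiv track=rewrite | github.com/ludimus/AOC2024 | day07/solution.py | can_make_target
-- ===== SOURCE A (Python) =====
-- from typing import List, Tuple
-- from itertools import product
--
-- def evaluate_left_to_right(numbers: List[int], operators: List[str]) -> int:
--     """Evaluate numbers with operators from left to right."""
--     result = numbers[0]
--
--     for i, op in enumerate(operators):
--         if op == '+':
--             result += numbers[i + 1]
--         elif op == '*':
--             result *= numbers[i + 1]
--
--     return result
--
-- def can_make_target(target: int, numbers: List[int]) -> bool:
--     """Check if target can be made by placing operators between numbers."""
--     if len(numbers) == 1:
--         return target == numbers[0]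
--
--     # Number of operator positions is len(numbers) - 1
--     num_operators = len(numbers) - 1
--
--     # Try all combinations of + and * operators
--     for operators in product(['+', '*'], repeat=num_operators):
--         result = evaluate_left_to_right(numbers, list(operators))
--         if result == target:
--             return True
--
--     return False
-- ===== SOURCE B (Python) =====
-- def can_make_target(target, numbers):
--     """Backward search: peel numbers off the right end, undoing '+' by
--     subtraction and '*' by exact division (pruned by divisibility)."""
--     return _reachable(target, numbers[::-1])
--
-- def _reachable(target, rev):
--     if len(rev) == 1:
--         return target == rev[0]
--     last, rest = rev[0], rev[1:]
--     if _reachable(target - last, rest):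
--         return True
--     if last == 0:
--         # prev * 0 == target only for target == 0 (any prefix value works)
--         return target == 0
--     return target % last == 0 and _reachable(target // last, rest)
-- ===== Notes on version B (the rewrite author's own statement) =====
-- stated objective: faster
-- what changed: Instead of enumerating all 2^(n-1) operator tuples and evaluating each left-to-right, B searches backward from the target, peeling the last number off and undoing '+' by subtraction and '*' by exact division, pruning the '*' branch whenever the target is not divisible by the last number.
import Mathlib
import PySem

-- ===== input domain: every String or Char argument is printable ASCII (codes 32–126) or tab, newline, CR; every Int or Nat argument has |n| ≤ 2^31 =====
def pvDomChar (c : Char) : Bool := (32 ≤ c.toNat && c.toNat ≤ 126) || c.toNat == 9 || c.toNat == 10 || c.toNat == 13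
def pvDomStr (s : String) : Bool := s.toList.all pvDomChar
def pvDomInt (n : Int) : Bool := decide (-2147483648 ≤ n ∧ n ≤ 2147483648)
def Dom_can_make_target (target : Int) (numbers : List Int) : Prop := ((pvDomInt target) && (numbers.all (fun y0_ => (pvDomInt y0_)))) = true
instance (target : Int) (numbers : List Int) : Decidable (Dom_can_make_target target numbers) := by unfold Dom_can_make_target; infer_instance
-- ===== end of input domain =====

-- B replaces A's enumeration of all 2^(n-1) operator tuples by a backward search from the
-- target (undo '+' by subtraction, '*' by exact division with divisibility pruning); faster.

-- ===== PORT A =====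
-- product(['+','*'], repeat=n): leftmost position varies slowest, as in itertools.product
def pvProdRep : Nat → List (List String)
  | 0 => [[]]
  | n + 1 => (["+", "*"]).flatMap (fun op => (pvProdRep n).map (op :: ·))

-- evaluate_left_to_right: result = numbers[0]; for i, op in enumerate(operators): ...
-- numbers[0] / numbers[i+1] raise only outside Pre_ (indices are in range under Pre_),
-- so the default-0 of pyGetD is never used there.
def evaluate_left_to_right (numbers : List Int) (operators : List String) : Int :=
  (PySem.List.enumerate operators).foldl
    (fun (result : Int) (p : Int × String) =>
      if p.2 = "+" then result + PySem.List.pyGetD numbers (p.1 + 1) 0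
      else if p.2 = "*" then result * PySem.List.pyGetD numbers (p.1 + 1) 0
      else result)
    (PySem.List.pyGetD numbers 0 0)

def can_make_target (target : Int) (numbers : List Int) : Bool :=
  if numbers.length = 1 then target == PySem.List.pyGetD numbers 0 0
  else
    -- for operators in product(...): if evaluate(...) == target: return True; return False
    (pvProdRep (numbers.length - 1)).any
      (fun operators => evaluate_left_to_right numbers operators == target)

-- ===== PORT B =====
-- _reachable(target, rev): rev is numbers reversed; [] only outside Pre_ (Python raises there)
def pvReach (target : Int) : List Int → Bool
  | [] => false
  | [x] => target == x
  | last :: rest =>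
      if pvReach (target - last) rest then true
      else if last = 0 then target == 0
      else (PySem.Int.mod target last == 0) && pvReach (PySem.Int.floordiv target last) rest

def can_make_target_alt (target : Int) (numbers : List Int) : Bool :=
  pvReach target numbers.reverse

-- ===== PRECONDITION & SPEC =====
-- A raises ValueError on numbers = [] (product with repeat = -1); B raises IndexError there too.
def Pre_can_make_target (target : Int) (numbers : List Int) : Prop := numbers ≠ []
instance (target : Int) (numbers : List Int) : Decidable (Pre_can_make_target target numbers) := by
  unfold Pre_can_make_target; infer_instance

def pvWitness_can_make_target : Int × List Int := (6, [2, 3])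

def Spec_can_make_target (target : Int) (numbers : List Int) (out : Bool) : Prop := out = can_make_target_alt target numbers
instance (target : Int) (numbers : List Int) (out : Bool) : Decidable (Spec_can_make_target target numbers out) := by unfold Spec_can_make_target; infer_instance

-- ===== CLAIM (what is proved, stated in full; the proofs are below) =====
def Claim_equal_can_make_target : Prop := ∀ (target : Int) (numbers : List Int), Dom_can_make_target target numbers → Pre_can_make_target target numbers → Spec_can_make_target target numbers (can_make_target target numbers)

-- ===== LEMMAS AND PROOFS =====

-- chain of (operator, operand) applications, left to right
def pvChain : Int → List (String × Int) → Int
  | r, [] => r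
  | r, (op, y) :: t => pvChain (if op = "+" then r + y else if op = "*" then r * y else r) t

-- all values reachable from accumulator x over the remaining numbers
def pvVals : Int → List Int → List Int
  | x, [] => [x]
  | x, y :: ys => pvVals (x + y) ys ++ pvVals (x * y) ys

lemma pvVals_ne_nil (x : Int) (l : List Int) : pvVals x l ≠ [] := by
  induction l generalizing x with
  | nil => simp [pvVals]
  | cons y ys ih => simp [pvVals, ih]

lemma pvVals_append_last (x y : Int) (zs : List Int) :
    pvVals x (zs ++ [y]) = (pvVals x zs).flatMap (fun v => [v + y, v * y]) := by
  induction zs generalizing x with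
  | nil => simp [pvVals]
  | cons z zt ih => simp [pvVals, ih, List.flatMap_append]

lemma pvProdRep_length {n : Nat} {ops : List String} (h : ops ∈ pvProdRep n) :
    ops.length = n := by
  induction n generalizing ops with
  | zero => simp [pvProdRep] at h; simp [h]
  | succ m ih =>
    simp only [pvProdRep, List.mem_flatMap, List.mem_map] at h
    obtain ⟨op, _, ops', hm, rfl⟩ := h
    simp [ih hm]

lemma pv_enum_fold (nums : List Int) (ops : List String) :
    ∀ (i : Nat) (r : Int), (i + 1) + ops.length ≤ nums.length →
      (PySem.List.enumerate ops (i : Int)).foldl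
        (fun (result : Int) (p : Int × String) =>
          if p.2 = "+" then result + PySem.List.pyGetD nums (p.1 + 1) 0
          else if p.2 = "*" then result * PySem.List.pyGetD nums (p.1 + 1) 0
          else result)
        r = pvChain r (ops.zip (nums.drop (i + 1))) := by
  induction ops with
  | nil => intro i r h; simp [PySem.List.enumerate, pvChain]
  | cons op opt ih =>
    intro i r h
    have hlt : i + 1 < nums.length := by simp at h; omega
    have hget : PySem.List.pyGetD nums ((i : Int) + 1) 0 = nums[i + 1] := by
      have : ((i : Int) + 1) = ((i + 1 : Nat) : Int) := by push_cast; ring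
      rw [this, PySem.List.pyGetD_natCast]
      simp [List.getD_eq_getElem?_getD, List.getElem?_eq_getElem hlt]
    have hdrop : nums.drop (i + 1) = nums[i + 1] :: nums.drop (i + 2) := by
      rw [List.drop_eq_getElem_cons hlt]
    have hcast : ((i : Int) + 1) = ((i + 1 : Nat) : Int) := by push_cast; ring
    rw [PySem.List.enumerate_cons]
    simp only [List.foldl_cons, hget, hdrop, List.zip_cons_cons, pvChain]
    rw [hcast, ih (i + 1) _ (by simp at h ⊢; omega)]

lemma pv_eval_chain (x : Int) (rest : List Int) (ops : List String)
    (h : ops.length = rest.length) :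
    evaluate_left_to_right (x :: rest) ops = pvChain x (ops.zip rest) := by
  unfold evaluate_left_to_right
  have h0 : PySem.List.pyGetD (x :: rest) 0 0 = x := by
    simp [PySem.List.pyGetD, PySem.List.pyGet?, PySem.List.pyIdx?]
  have := pv_enum_fold (x :: rest) ops 0 x (by simp [h]; omega)
  simpa [h0] using this

lemma pv_any_chain (rest : List Int) (x t : Int) :
    ((pvProdRep rest.length).any fun ops => pvChain x (ops.zip rest) == t)
      = (pvVals x rest).contains t := by
  induction rest generalizing x with
  | nil =>
    rw [Bool.eq_iff_iff]
    simp only [pvProdRep, pvVals, List.length_nil, List.any_cons, List.any_nil,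
      List.zip_nil_right, Bool.or_false, List.contains_eq_mem, beq_iff_eq,
      decide_eq_true_eq, List.mem_singleton]
    show pvChain x [] = t ↔ _
    simp [pvChain, eq_comm]
  | cons y ys ih =>
    have hplus : ∀ ops : List String,
        pvChain x (("+" :: ops).zip (y :: ys)) = pvChain (x + y) (ops.zip ys) := by
      intro ops; simp [pvChain]
    have hstar : ∀ ops : List String,
        pvChain x (("*" :: ops).zip (y :: ys)) = pvChain (x * y) (ops.zip ys) := by
      intro ops; simp [pvChain]
    show (pvProdRep (ys.length + 1)).any (fun ops => pvChain x (ops.zip (y :: ys)) == t) = _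
    simp only [pvProdRep, List.any_flatMap, List.any_map, List.any_cons, List.any_nil,
      Bool.or_false, Function.comp_def, hplus, hstar, ih]
    show _ = (pvVals (x + y) ys ++ pvVals (x * y) ys).contains t
    rw [List.contains_append]

lemma pv_reach_vals (ys : List Int) : ∀ (x t : Int),
    pvReach t (ys.reverse ++ [x]) = (pvVals x ys).contains t := by
  induction ys using List.reverseRecOn with
  | nil =>
    intro x t
    rw [Bool.eq_iff_iff]
    simp [pvReach, pvVals, List.contains_eq_mem]
  | append_singleton zs y ih =>
    intro x t
    have hsplit : (zs ++ [y]).reverse ++ [x] = y :: (zs.reverse ++ [x]) := by simp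
    obtain ⟨z, l', hl⟩ : ∃ z l', zs.reverse ++ [x] = z :: l' := by
      cases h : zs.reverse ++ [x] with
      | nil => simp at h
      | cons a b => exact ⟨a, b, rfl⟩
    have hmem : ∀ s : Int, (pvReach s (z :: l') = true) ↔ s ∈ pvVals x zs := by
      intro s
      rw [← hl, ih x s]
      simp [List.contains_eq_mem]
    rw [hsplit, hl, pvVals_append_last, Bool.eq_iff_iff]
    simp only [List.contains_eq_mem, decide_eq_true_eq, List.mem_flatMap, List.mem_cons,
      List.not_mem_nil, or_false]
    constructor
    · intro h
      simp only [pvReach] at h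
      by_cases hadd : pvReach (t - y) (z :: l') = true
      · exact ⟨t - y, (hmem _).mp hadd, Or.inl (by ring)⟩
      · rw [if_neg hadd] at h
        by_cases hy : y = 0
        · rw [if_pos hy] at h
          have ht : t = 0 := by simpa using h
          obtain ⟨v, hv⟩ := List.exists_mem_of_ne_nil _ (pvVals_ne_nil x zs)
          exact ⟨v, hv, Or.inr (by simp [hy, ht])⟩
        · rw [if_neg hy] at h
          simp only [Bool.and_eq_true, beq_iff_eq] at h
          obtain ⟨hmod, hrec⟩ := h
          have hdvd : y ∣ t := (PySem.Int.mod_eq_zero_iff_dvd t y).mp hmod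
          have hq : PySem.Int.floordiv t y * y = t := by
            have := PySem.Int.floordiv_mul_add_mod t y
            omega
          exact ⟨PySem.Int.floordiv t y, (hmem _).mp hrec, Or.inr hq.symm⟩
    · rintro ⟨v, hv, hw | hw⟩
      · -- t = v + y : the subtraction branch fires
        have hadd : pvReach (t - y) (z :: l') = true := by
          rw [hmem]
          have : t - y = v := by omega
          rwa [this]
        simp [pvReach, hadd]
      · -- t = v * y : the zero or division branch fires
        simp only [pvReach]
        by_cases hadd : pvReach (t - y) (z :: l') = true
        · simp [hadd]
        · rw [if_neg hadd]
          by_cases hy : y = 0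
          · rw [if_pos hy]
            simp [hw, hy]
          · rw [if_neg hy]
            have hdvd : y ∣ t := ⟨v, by rw [hw]; ring⟩
            have hmod : PySem.Int.mod t y = 0 := (PySem.Int.mod_eq_zero_iff_dvd t y).mpr hdvd
            have hq : PySem.Int.floordiv t y = v := by
              have h1 : PySem.Int.floordiv t y * y = t := by
                have := PySem.Int.floordiv_mul_add_mod t y
                omega
              have h2 : v * y = t := by rw [hw]
              exact mul_right_cancel₀ hy (h1.trans h2.symm)
            simp only [hmod, hq, Bool.and_eq_true, beq_iff_eq]
            exact ⟨trivial, (hmem v).mpr hv⟩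

-- ===== VERDICT (by name: the statement is the Claim_ definition above) =====
theorem can_make_target_spec : Claim_equal_can_make_target := by
  intro target numbers _dom pre
  unfold Spec_can_make_target
  cases numbers with
  | nil => exact absurd rfl pre
  | cons x rest =>
    unfold can_make_target can_make_target_alt
    by_cases hr : rest = []
    · subst hr
      simp [pvReach, PySem.List.pyGetD, PySem.List.pyGet?, PySem.List.pyIdx?]
    · have hlen : (x :: rest).length ≠ 1 := by
        simp only [List.length_cons, ne_eq]
        intro h
        exact hr (List.eq_nil_of_length_eq_zero (by omega))
      rw [if_neg hlen]
      have hlen1 : (x :: rest).length - 1 = rest.length := by simp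
      rw [hlen1]
      have hB : pvReach target (x :: rest).reverse = (pvVals x rest).contains target := by
        rw [List.reverse_cons]
        exact pv_reach_vals rest x target
      rw [hB, ← pv_any_chain rest x target, Bool.eq_iff_iff]
      simp only [List.any_eq_true]
      constructor
      · rintro ⟨ops, h1, h2⟩
        refine ⟨ops, h1, ?_⟩
        rwa [← pv_eval_chain x rest ops (pvProdRep_length h1)]
      · rintro ⟨ops, h1, h2⟩
        refine ⟨ops, h1, ?_⟩
        rwa [pv_eval_chain x rest ops (pvProdRep_length h1)]
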